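-- pv_equiv track=rewrite | github.com/speechcatcher-asr/speechcatcher-data | data_server/create_dataset.py | parse_vtt_segments
-- ===== SOURCE A (Python) =====
-- def parse_vtt_segments(vtt_content, ignore_repeat_lines=3):
--     lines = vtt_content.split('\n')
--     segments = []
--
--     # Iterate over the lines and parse the segments
--     current_segment = None
--     last_text = None
--     repeat_count = 0
--
--     for line in lines:
--         if line.startswith('WEB'):
--             continue
--
--         # This line indicates the start of a new segment and time stamp info
--         if '-->' in line:
--             if current_segment:
--                 current_text = current_segment['text'].strip()
--                 repeat_count = repeat_count + 1 if current_text == last_text else 0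
--
--                 if repeat_count < ignore_repeat_lines:
--                     segments.append(current_segment)
--                     last_text = current_text
--             # Start a new segment
--             a, b = line.split('-->')
--             a, b = a.strip(), b.strip()
--             current_segment = {'start': a, 'end': b, 'text': ''}
--         elif line.strip():
--             if current_segment['text'] == '':
--                 current_segment['text'] = line
--             else:
--                 current_segment['text'] += '\n' + line
--
--     # Handle the last segment
--     if current_segment:
--         current_text = current_segment['text'].strip()
--         repeat_count = repeat_count + 1 if current_text == last_text else 0
--
--         if repeat_count < ignore_repeat_lines:
--             segments.append(current_segment)
--
--     return segments
-- ===== SOURCE B (Python) =====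
-- def parse_vtt_segments(vtt_content, ignore_repeat_lines=3):
--     # Pass 1: parse the raw cues (timestamp pairs with accumulated text).
--     cues = []
--     current = None
--     for line in vtt_content.split('\n'):
--         if line.startswith('WEB'):
--             continue
--         if '-->' in line:
--             if current is not None:
--                 cues.append(current)
--             a, b = line.split('-->')
--             current = {'start': a.strip(), 'end': b.strip(), 'text': ''}
--         elif line.strip():
--             if current['text'] == '':
--                 current['text'] = line
--             else:
--                 current['text'] += '\n' + line
--     if current is not None:
--         cues.append(current)
--
--     # Pass 2: drop cues whose stripped text repeats the last kept text too often.
--     segments = []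
--     last_text = None
--     repeat_count = 0
--     for cue in cues:
--         text = cue['text'].strip()
--         repeat_count = repeat_count + 1 if text == last_text else 0
--         if repeat_count < ignore_repeat_lines:
--             segments.append(cue)
--             last_text = text
--     return segments
-- ===== Notes on version B (the rewrite author's own statement) =====
-- stated objective: simpler
-- what changed: Single interleaved parse+dedup loop with a duplicated finalize block replaced by two separate passes: pass 1 builds the raw cue list, pass 2 filters repeated texts once, eliminating the copy-pasted in-loop/after-loop filtering code.
import Mathlib
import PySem

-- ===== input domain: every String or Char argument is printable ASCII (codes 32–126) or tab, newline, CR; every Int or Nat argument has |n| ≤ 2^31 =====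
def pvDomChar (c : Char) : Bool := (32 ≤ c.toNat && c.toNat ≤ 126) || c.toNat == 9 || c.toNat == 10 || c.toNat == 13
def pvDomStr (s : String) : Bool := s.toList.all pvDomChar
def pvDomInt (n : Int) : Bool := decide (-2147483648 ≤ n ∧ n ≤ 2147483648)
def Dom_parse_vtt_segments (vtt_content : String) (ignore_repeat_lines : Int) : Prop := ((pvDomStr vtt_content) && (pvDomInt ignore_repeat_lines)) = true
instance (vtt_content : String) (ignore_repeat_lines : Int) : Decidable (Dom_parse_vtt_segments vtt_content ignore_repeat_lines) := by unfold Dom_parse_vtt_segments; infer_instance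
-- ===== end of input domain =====

-- B replaces A's interleaved parse+filter loop (with its duplicated finalize block) by two
-- separate passes (parse raw cues, then filter repeats); return values are proved equal on Pre_.

-- ===== PORT A =====
-- parse the "a --> b" line into a fresh segment dict (shared literal code of both Pythons)
def pvNewSeg (line : String) : PySem.Dict String String :=
  let parts := (PySem.Str.split? line "-->").getD []
  let a := PySem.Str.strip (parts.getD 0 "")
  let b := PySem.Str.strip (parts.getD 1 "")
  (((PySem.Dict.empty).insert "start" a).insert "end" b).insert "text" ""

-- the `elif line.strip():` text-accumulation body (shared literal code of both Pythons)
def pvAddText (d : PySem.Dict String String) (line : String) : PySem.Dict String String :=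
  if d.getD "text" "" = "" then d.insert "text" line
  else d.insert "text" (d.getD "text" "" ++ "\n" ++ line)

-- state: (segments, current_segment, last_text, repeat_count)
def pvStateA : Type := List (PySem.Dict String String) × Option (PySem.Dict String String) × Option String × Int

-- the dedup/append block A runs both at each '-->' line and after the loop
def pvFlushA (ign : Int) (segs : List (PySem.Dict String String))
    (d : PySem.Dict String String) (last : Option String) (rc : Int) :
    List (PySem.Dict String String) × Option String × Int :=
  let t := PySem.Str.strip (d.getD "text" "")
  let rc := if some t = last then rc + 1 else 0
  if rc < ign then (segs ++ [d], some t, rc) else (segs, last, rc)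

def pvStepA (ign : Int) (st : pvStateA) (line : String) : pvStateA :=
  if PySem.Str.startswith line "WEB" then st
  else if PySem.Str.isIn "-->" line then
    match st.2.1 with
    | some d =>
      ((pvFlushA ign st.1 d st.2.2.1 st.2.2.2).1, some (pvNewSeg line),
        (pvFlushA ign st.1 d st.2.2.1 st.2.2.2).2)
    | none => (st.1, some (pvNewSeg line), st.2.2)
  else if PySem.Str.strip line ≠ "" then
    match st.2.1 with
    | some d => (st.1, some (pvAddText d line), st.2.2)
    | none => st  -- Python raises TypeError here; excluded by Pre_
  else st

def parse_vtt_segments (vtt_content : String) (ignore_repeat_lines : Int) : List (List (String × String)) :=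
  let lines := (PySem.Str.split? vtt_content "\n").getD []
  let st := lines.foldl (pvStepA ignore_repeat_lines) ([], none, none, 0)
  let out := match st.2.1 with
    | some d => (pvFlushA ignore_repeat_lines st.1 d st.2.2.1 st.2.2.2).1
    | none => st.1
  out.map (·.items)

-- ===== PORT B =====
-- pass 1 state: (cues, current)
def pvStep1 (st : List (PySem.Dict String String) × Option (PySem.Dict String String)) (line : String) :
    List (PySem.Dict String String) × Option (PySem.Dict String String) :=
  if PySem.Str.startswith line "WEB" then st
  else if PySem.Str.isIn "-->" line then
    (match st.2 with | some d => st.1 ++ [d] | none => st.1, some (pvNewSeg line))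
  else if PySem.Str.strip line ≠ "" then
    match st.2 with
    | some d => (st.1, some (pvAddText d line))
    | none => st  -- Python raises TypeError here; excluded by Pre_
  else st

-- pass 2 state: (segments, last_text, repeat_count)
def pvStep2 (ign : Int) (st : List (PySem.Dict String String) × Option String × Int)
    (cue : PySem.Dict String String) : List (PySem.Dict String String) × Option String × Int :=
  let t := PySem.Str.strip (cue.getD "text" "")
  let rc := if some t = st.2.1 then st.2.2 + 1 else 0
  if rc < ign then (st.1 ++ [cue], some t, rc) else (st.1, st.2.1, rc)

def parse_vtt_segments_alt (vtt_content : String) (ignore_repeat_lines : Int) : List (List (String × String)) :=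
  let lines := (PySem.Str.split? vtt_content "\n").getD []
  let p := lines.foldl pvStep1 ([], none)
  let cues := match p.2 with | some d => p.1 ++ [d] | none => p.1
  (cues.foldl (pvStep2 ignore_repeat_lines) ([], none, 0)).1.map (·.items)

-- ===== PRECONDITION & SPEC =====
-- Pre_ excludes exactly the inputs where Python A raises: a non-blank, non-WEB text line before
-- the first cue line (TypeError on current_segment[...]), or a non-WEB line containing '-->'
-- more than once (ValueError unpacking line.split('-->')).
def Pre_parse_vtt_segments (vtt_content : String) (ignore_repeat_lines : Int) : Prop :=
  let lines := (PySem.Str.split? vtt_content "\n").getD []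
  let rel := lines.filter (fun l => !(PySem.Str.startswith l "WEB"))
  (∀ l ∈ rel, PySem.Str.isIn "-->" l = true → PySem.Str.count l "-->" = 1) ∧
  (∀ l ∈ rel.takeWhile (fun l => !(PySem.Str.isIn "-->" l)), PySem.Str.strip l = "")
instance (vtt_content : String) (ignore_repeat_lines : Int) : Decidable (Pre_parse_vtt_segments vtt_content ignore_repeat_lines) := by unfold Pre_parse_vtt_segments; infer_instance

def pvWitness_parse_vtt_segments : String × Int :=
  ("WEBVTT\n\n00:1 --> 00:2\nhello\n\n00:3 --> 00:4\nhello", 3)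

def Spec_parse_vtt_segments (vtt_content : String) (ignore_repeat_lines : Int) (out : List (List (String × String))) : Prop := out = parse_vtt_segments_alt vtt_content ignore_repeat_lines
instance (vtt_content : String) (ignore_repeat_lines : Int) (out : List (List (String × String))) : Decidable (Spec_parse_vtt_segments vtt_content ignore_repeat_lines out) := by unfold Spec_parse_vtt_segments; infer_instance

-- ===== CLAIM (what is proved, stated in full; the proofs are below) =====
def Claim_equal_parse_vtt_segments : Prop := ∀ (vtt_content : String) (ignore_repeat_lines : Int), Dom_parse_vtt_segments vtt_content ignore_repeat_lines → Pre_parse_vtt_segments vtt_content ignore_repeat_lines → Spec_parse_vtt_segments vtt_content ignore_repeat_lines (parse_vtt_segments vtt_content ignore_repeat_lines)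

-- ===== LEMMAS AND PROOFS =====

-- one-step equations for A's loop body
theorem stepA_web (ign : Int) (st : pvStateA) (line : String)
    (h : PySem.Str.startswith line "WEB" = true) : pvStepA ign st line = st := by
  simp only [pvStepA, h, reduceIte]

theorem stepA_arrow (ign : Int) (st : pvStateA) (line : String)
    (h1 : PySem.Str.startswith line "WEB" = false) (h2 : PySem.Str.isIn "-->" line = true) :
    pvStepA ign st line = match st.2.1 with
      | some d => ((pvFlushA ign st.1 d st.2.2.1 st.2.2.2).1, some (pvNewSeg line),
          (pvFlushA ign st.1 d st.2.2.1 st.2.2.2).2)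
      | none => (st.1, some (pvNewSeg line), st.2.2) := by
  simp only [pvStepA, h1, h2, Bool.false_eq_true, if_false, reduceIte]

theorem stepA_text (ign : Int) (st : pvStateA) (line : String)
    (h1 : PySem.Str.startswith line "WEB" = false) (h2 : PySem.Str.isIn "-->" line = false)
    (h3 : ¬ PySem.Str.strip line = "") :
    pvStepA ign st line = match st.2.1 with
      | some d => (st.1, some (pvAddText d line), st.2.2)
      | none => st := by
  simp only [pvStepA, h1, h2, h3, Bool.false_eq_true, if_false, ne_eq, not_false_eq_true, if_true]

theorem stepA_blank (ign : Int) (st : pvStateA) (line : String)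
    (h1 : PySem.Str.startswith line "WEB" = false) (h2 : PySem.Str.isIn "-->" line = false)
    (h3 : PySem.Str.strip line = "") : pvStepA ign st line = st := by
  simp only [pvStepA, h1, h2, h3, Bool.false_eq_true, if_false, ne_eq, not_true_eq_false]

-- one-step equations for pass 1
theorem step1_web (st : List (PySem.Dict String String) × Option (PySem.Dict String String))
    (line : String) (h : PySem.Str.startswith line "WEB" = true) : pvStep1 st line = st := by
  simp only [pvStep1, h, reduceIte]

theorem step1_arrow (st : List (PySem.Dict String String) × Option (PySem.Dict String String))
    (line : String) (h1 : PySem.Str.startswith line "WEB" = false)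
    (h2 : PySem.Str.isIn "-->" line = true) :
    pvStep1 st line = (match st.2 with | some d => st.1 ++ [d] | none => st.1, some (pvNewSeg line)) := by
  simp only [pvStep1, h1, h2, Bool.false_eq_true, if_false, reduceIte]

theorem step1_text (st : List (PySem.Dict String String) × Option (PySem.Dict String String))
    (line : String) (h1 : PySem.Str.startswith line "WEB" = false)
    (h2 : PySem.Str.isIn "-->" line = false) (h3 : ¬ PySem.Str.strip line = "") :
    pvStep1 st line = match st.2 with
      | some d => (st.1, some (pvAddText d line))
      | none => st := by
  simp only [pvStep1, h1, h2, h3, Bool.false_eq_true, if_false, ne_eq, not_false_eq_true, if_true]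

theorem step1_blank (st : List (PySem.Dict String String) × Option (PySem.Dict String String))
    (line : String) (h1 : PySem.Str.startswith line "WEB" = false)
    (h2 : PySem.Str.isIn "-->" line = false) (h3 : PySem.Str.strip line = "") :
    pvStep1 st line = st := by
  simp only [pvStep1, h1, h2, h3, Bool.false_eq_true, if_false, ne_eq, not_true_eq_false]

-- pass 1 only appends to its cue list: the accumulator factors out
theorem pvStep1_acc (lines : List String) (acc : List (PySem.Dict String String))
    (cur : Option (PySem.Dict String String)) :
    lines.foldl pvStep1 (acc, cur)
      = (acc ++ (lines.foldl pvStep1 ([], cur)).1, (lines.foldl pvStep1 ([], cur)).2) := by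
  induction lines generalizing acc cur with
  | nil => simp
  | cons line lines ih =>
    rw [List.foldl_cons, List.foldl_cons]
    cases h1 : PySem.Str.startswith line "WEB" with
    | true => rw [step1_web _ _ h1, step1_web _ _ h1]; exact ih acc cur
    | false =>
    cases h2 : PySem.Str.isIn "-->" line with
    | true =>
      rw [step1_arrow _ _ h1 h2, step1_arrow _ _ h1 h2]
      cases cur with
      | none => exact ih acc (some (pvNewSeg line))
      | some d =>
        rw [ih (acc ++ [d]) (some (pvNewSeg line)), ih ([] ++ [d]) (some (pvNewSeg line))]
        simp
    | false =>
      by_cases h3 : PySem.Str.strip line = ""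
      · rw [step1_blank _ _ h1 h2 h3, step1_blank _ _ h1 h2 h3]; exact ih acc cur
      · rw [step1_text _ _ h1 h2 h3, step1_text _ _ h1 h2 h3]
        cases cur with
        | none => exact ih acc none
        | some d => exact ih acc (some (pvAddText d line))

-- finish of pass 1 (append the pending cue)
def pvFin1 (p : List (PySem.Dict String String) × Option (PySem.Dict String String)) :
    List (PySem.Dict String String) :=
  match p.2 with | some d => p.1 ++ [d] | none => p.1

theorem pvFin1_acc (acc : List (PySem.Dict String String))
    (p : List (PySem.Dict String String) × Option (PySem.Dict String String)) :
    pvFin1 (acc ++ p.1, p.2) = acc ++ pvFin1 p := by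
  cases hp : p.2 <;> simp [pvFin1, hp]

-- one pass-2 step is exactly A's flush block
theorem pvStep2_eq_flush (ign : Int) (out : List (PySem.Dict String String))
    (last : Option String) (rc : Int) (d : PySem.Dict String String) :
    pvStep2 ign (out, last, rc) d = pvFlushA ign out d last rc := rfl

-- main invariant: finalized A-loop from any state = pass 2 over the pass-1 cues from the matching state
theorem pvMain (ign : Int) (lines : List String)
    (cur : Option (PySem.Dict String String)) (out : List (PySem.Dict String String))
    (last : Option String) (rc : Int) :
    (let st := lines.foldl (pvStepA ign) (out, cur, last, rc)
     match st.2.1 with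
     | some d => (pvFlushA ign st.1 d st.2.2.1 st.2.2.2).1
     | none => st.1)
      = ((pvFin1 (lines.foldl pvStep1 ([], cur))).foldl (pvStep2 ign) (out, last, rc)).1 := by
  induction lines generalizing cur out last rc with
  | nil =>
    cases cur with
    | none => simp [pvFin1]
    | some d =>
      simp only [List.foldl_nil, pvFin1, List.nil_append, List.foldl_cons, pvStep2_eq_flush]
  | cons line lines ih =>
    simp only [List.foldl_cons]
    cases h1 : PySem.Str.startswith line "WEB" with
    | true => rw [stepA_web _ _ _ h1, step1_web _ _ h1]; exact ih cur out last rc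
    | false =>
    cases h2 : PySem.Str.isIn "-->" line with
    | true =>
      rw [stepA_arrow _ _ _ h1 h2, step1_arrow _ _ h1 h2]
      cases cur with
      | none => exact ih (some (pvNewSeg line)) out last rc
      | some d =>
        rw [pvStep1_acc lines ([] ++ [d]) (some (pvNewSeg line))]
        simp only [List.nil_append]
        rw [pvFin1_acc [d] (lines.foldl pvStep1 ([], some (pvNewSeg line)))]
        simp only [List.cons_append, List.nil_append, List.foldl_cons, pvStep2_eq_flush]
        exact ih (some (pvNewSeg line)) (pvFlushA ign out d last rc).1
          (pvFlushA ign out d last rc).2.1 (pvFlushA ign out d last rc).2.2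
    | false =>
      by_cases h3 : PySem.Str.strip line = ""
      · rw [stepA_blank _ _ _ h1 h2 h3, step1_blank _ _ h1 h2 h3]; exact ih cur out last rc
      · rw [stepA_text _ _ _ h1 h2 h3, step1_text _ _ h1 h2 h3]
        cases cur with
        | none => exact ih none out last rc
        | some d => exact ih (some (pvAddText d line)) out last rc

-- ===== VERDICT (by name: the statement is the Claim_ definition above) =====
theorem parse_vtt_segments_spec : Claim_equal_parse_vtt_segments := by
  intro vtt ign _ _
  unfold Spec_parse_vtt_segments parse_vtt_segments parse_vtt_segments_alt
  have := pvMain ign ((PySem.Str.split? vtt "\n").getD []) none [] none 0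
  simp only [pvFin1] at this
  simp only [this]
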